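-- pv_equiv track=rewrite | github.com/tufimtseva/ski_pose_classifier | backend/ml_model/classifier_pipeline.py | __sort_by_turn_phases_grouped
-- ===== SOURCE A (Python) =====
-- def __sort_by_turn_phases_grouped(img_names, turn_phases):
--     grouped = {'left': [], 'middle': [], 'right': []}
--
--     if not img_names or not turn_phases:
--         return grouped
--
--     current_phase = turn_phases[0]
--     current_group = [img_names[0]]
--
--     for phase, name in zip(turn_phases[1:], img_names[1:]):
--         if phase == current_phase:
--             current_group.append(name)
--         else:
--             grouped[current_phase].append(current_group)
--             current_phase = phase
--             current_group = [name]
--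
--     grouped[current_phase].append(current_group)
--     return grouped
-- ===== SOURCE B (Python) =====
-- def __sort_by_turn_phases_grouped(img_names, turn_phases):
--     grouped = {'left': [], 'middle': [], 'right': []}
--     pairs = list(zip(turn_phases, img_names))
--     i = 0
--     while i < len(pairs):
--         phase = pairs[i][0]
--         j = i + 1
--         while j < len(pairs) and pairs[j][0] == phase:
--             j += 1
--         grouped[phase].append([name for _, name in pairs[i:j]])
--         i = j
--     return grouped
-- ===== Notes on version B (the rewrite author's own statement) =====
-- stated objective: alternative
-- what changed: Replaces A's state-machine accumulator (current_phase/current_group carried across the loop, flushed on change and once after the loop) with a two-pointer run scanner over the zipped pairs: each maximal equal-phase run is located by an inner scan and appended directly, so there is no carried group state and no post-loop flush.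
import Mathlib
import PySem

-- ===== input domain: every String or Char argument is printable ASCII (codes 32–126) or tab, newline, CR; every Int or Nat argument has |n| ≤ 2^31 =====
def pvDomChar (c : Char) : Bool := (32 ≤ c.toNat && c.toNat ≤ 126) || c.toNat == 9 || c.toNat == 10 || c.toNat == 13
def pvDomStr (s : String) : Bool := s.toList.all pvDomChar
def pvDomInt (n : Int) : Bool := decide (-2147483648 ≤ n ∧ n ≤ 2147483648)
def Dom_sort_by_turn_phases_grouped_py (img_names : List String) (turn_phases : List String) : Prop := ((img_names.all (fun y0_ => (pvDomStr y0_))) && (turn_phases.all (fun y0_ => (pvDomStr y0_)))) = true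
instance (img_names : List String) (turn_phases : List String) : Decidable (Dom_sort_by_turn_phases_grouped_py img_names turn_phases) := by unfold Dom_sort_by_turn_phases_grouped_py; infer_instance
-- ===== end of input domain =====

-- B replaces A's carried current_phase/current_group state machine by a two-pointer run scanner
-- over the zipped (phase, name) pairs (objective: alternative decomposition, same O(n) cost).

-- ===== PORT A =====
-- A: state machine over zip(turn_phases[1:], img_names[1:]) carrying (grouped, current_phase,
-- current_group); 'grouped[current_phase].append(current_group)' is Dict.modify with default []
-- (Python raises KeyError on a missing key there — those inputs are outside Pre_ below).
def sort_by_turn_phases_grouped_py (img_names : List String) (turn_phases : List String) : List (String × List (List String)) :=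
  let grouped : PySem.Dict String (List (List String)) :=
    PySem.Dict.ofList [("left", []), ("middle", []), ("right", [])]
  match img_names, turn_phases with
  | [], _ => grouped.items
  | _, [] => grouped.items
  | n0 :: ns, p0 :: ps =>
    let st := (ps.zip ns).foldl
      (fun (st : PySem.Dict String (List (List String)) × String × List String) pn =>
        if pn.1 == st.2.1 then (st.1, st.2.1, st.2.2 ++ [pn.2])
        else (st.1.modify st.2.1 [] (· ++ [st.2.2]), pn.1, [pn.2]))
      (grouped, p0, [n0])
    (st.1.modify st.2.1 [] (· ++ [st.2.2])).items

-- ===== PORT B =====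
-- B's outer/inner while loops over the pair array: each step takes one maximal run of equal
-- phases (inner scan = takeWhile/dropWhile) and appends its names as one group.
def pvRuns : List (String × String) → List (String × List String)
  | [] => []
  | (p, n) :: rest =>
    (p, n :: (rest.takeWhile (fun q => q.1 == p)).map Prod.snd) ::
      pvRuns (rest.dropWhile (fun q => q.1 == p))
  termination_by l => l.length
  decreasing_by
    exact Nat.lt_succ_of_le (List.length_dropWhile_le _ _)

def sort_by_turn_phases_grouped_py_alt (img_names : List String) (turn_phases : List String) : List (String × List (List String)) :=
  let grouped : PySem.Dict String (List (List String)) :=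
    PySem.Dict.ofList [("left", []), ("middle", []), ("right", [])]
  ((pvRuns (turn_phases.zip img_names)).foldl
    (fun d r => d.modify r.1 [] (· ++ [r.2])) grouped).items

-- ===== PRECONDITION & SPEC =====
-- Pre_ excludes exactly the inputs where Python A raises KeyError: a phase other than
-- 'left'/'middle'/'right' occurring in the consumed prefix of turn_phases (B raises there too).
def Pre_sort_by_turn_phases_grouped_py (img_names : List String) (turn_phases : List String) : Prop :=
  ∀ p ∈ turn_phases.take (min img_names.length turn_phases.length),
    p = "left" ∨ p = "middle" ∨ p = "right"
instance (img_names : List String) (turn_phases : List String) : Decidable (Pre_sort_by_turn_phases_grouped_py img_names turn_phases) := by unfold Pre_sort_by_turn_phases_grouped_py; infer_instance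

def pvWitness_sort_by_turn_phases_grouped_py : List String × List String :=
  (["a", "b", "c"], ["left", "left", "right"])

def Spec_sort_by_turn_phases_grouped_py (img_names : List String) (turn_phases : List String) (out : List (String × List (List String))) : Prop := out = sort_by_turn_phases_grouped_py_alt img_names turn_phases
instance (img_names : List String) (turn_phases : List String) (out : List (String × List (List String))) : Decidable (Spec_sort_by_turn_phases_grouped_py img_names turn_phases out) := by unfold Spec_sort_by_turn_phases_grouped_py; infer_instance

-- ===== CLAIM (what is proved, stated in full; the proofs are below) =====
def Claim_equal_sort_by_turn_phases_grouped_py : Prop := ∀ (img_names : List String) (turn_phases : List String), Dom_sort_by_turn_phases_grouped_py img_names turn_phases → Pre_sort_by_turn_phases_grouped_py img_names turn_phases → Spec_sort_by_turn_phases_grouped_py img_names turn_phases (sort_by_turn_phases_grouped_py img_names turn_phases)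

-- ===== LEMMAS AND PROOFS =====

-- A's state machine, phrased as the list of runs it will emit: the current run (cp, cg) grows
-- while phases match and is flushed when the phase changes (and once at the end).
def pvRunsWith (cp : String) (cg : List String) : List (String × String) → List (String × List String)
  | [] => [(cp, cg)]
  | (p, n) :: rest =>
    if p == cp then pvRunsWith cp (cg ++ [n]) rest
    else (cp, cg) :: pvRunsWith p [n] rest

theorem pvRunsWith_eq_runs (rest : List (String × String)) :
    ∀ (p : String) (acc : List String),
      pvRunsWith p acc rest =
        (p, acc ++ (rest.takeWhile (fun q => q.1 == p)).map Prod.snd) ::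
          pvRuns (rest.dropWhile (fun q => q.1 == p)) := by
  induction rest with
  | nil => intro p acc; simp [pvRunsWith, pvRuns]
  | cons qm r ih =>
    intro p acc
    obtain ⟨q, m⟩ := qm
    by_cases h : q = p
    · subst h
      simp [pvRunsWith, List.takeWhile, List.dropWhile, ih]
    · have hb : (q == p) = false := by simp [h]
      simp [pvRunsWith, List.takeWhile, List.dropWhile, hb, ih, pvRuns]

theorem pvFoldA_eq_foldRuns (pairs : List (String × String)) :
    ∀ (d : PySem.Dict String (List (List String))) (cp : String) (cg : List String),
      (let st := pairs.foldl
          (fun (st : PySem.Dict String (List (List String)) × String × List String) pn =>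
            if pn.1 == st.2.1 then (st.1, st.2.1, st.2.2 ++ [pn.2])
            else (st.1.modify st.2.1 [] (· ++ [st.2.2]), pn.1, [pn.2]))
          (d, cp, cg);
        st.1.modify st.2.1 [] (· ++ [st.2.2])) =
      (pvRunsWith cp cg pairs).foldl (fun d r => d.modify r.1 [] (· ++ [r.2])) d := by
  induction pairs with
  | nil => intro d cp cg; simp [pvRunsWith]
  | cons pn rest ih =>
    intro d cp cg
    obtain ⟨p, n⟩ := pn
    by_cases h : p = cp
    · subst h
      simp only [List.foldl_cons, pvRunsWith, beq_self_eq_true, if_true]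
      exact ih d p (cg ++ [n])
    · have hb : (p == cp) = false := by simp [h]
      simp only [List.foldl_cons, pvRunsWith, hb, if_false, Bool.false_eq_true]
      rw [ih]

-- ===== VERDICT (by name: the statement is the Claim_ definition above) =====
theorem sort_by_turn_phases_grouped_py_spec : Claim_equal_sort_by_turn_phases_grouped_py := by
  intro img_names turn_phases _ _
  unfold Spec_sort_by_turn_phases_grouped_py
  unfold sort_by_turn_phases_grouped_py sort_by_turn_phases_grouped_py_alt
  match img_names, turn_phases with
  | [], _ => simp [pvRuns]
  | n0 :: ns, [] => simp [pvRuns]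
  | n0 :: ns, p0 :: ps =>
    simp only [List.zip_cons_cons]
    rw [pvFoldA_eq_foldRuns, pvRunsWith_eq_runs]
    simp [pvRuns]
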